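-- pv_equiv track=rewrite | github.com/churdstheword/fontemon | solve.py | serializeFrame
-- ===== SOURCE A (Python) =====
-- def serializeFrame(frame):
--     shorthand = []
--     length = len(frame)
--     left = -1
--     for right in range(0, length):
--         if right == (length - 1) or frame[right] != frame[right + 1]:
--             shorthand.append([frame[right], right - left])
--             left = right
--     return shorthand
-- ===== SOURCE B (Python) =====
-- def encode(frame, lo, hi):
--     # run-length encode frame[lo:hi] (requires lo < hi) by divide and conquer
--     if hi - lo == 1:
--         return [[frame[lo], 1]]
--     mid = (lo + hi) // 2
--     left = encode(frame, lo, mid)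
--     right = encode(frame, mid, hi)
--     if left[-1][0] == right[0][0]:
--         return left[:-1] + [[left[-1][0], left[-1][1] + right[0][1]]] + right[1:]
--     return left + right
--
--
-- def serializeFrame(frame):
--     if not frame:
--         return []
--     return encode(frame, 0, len(frame))
-- ===== Notes on version B (the rewrite author's own statement) =====
-- stated objective: alternative
-- what changed: Replaced A's single left-to-right scan with lookahead boundary test and trailing left pointer by a divide-and-conquer: recursively run-length encode each half of the frame and merge the two encodings, fusing the boundary runs when they carry the same value.
import Mathlib
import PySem

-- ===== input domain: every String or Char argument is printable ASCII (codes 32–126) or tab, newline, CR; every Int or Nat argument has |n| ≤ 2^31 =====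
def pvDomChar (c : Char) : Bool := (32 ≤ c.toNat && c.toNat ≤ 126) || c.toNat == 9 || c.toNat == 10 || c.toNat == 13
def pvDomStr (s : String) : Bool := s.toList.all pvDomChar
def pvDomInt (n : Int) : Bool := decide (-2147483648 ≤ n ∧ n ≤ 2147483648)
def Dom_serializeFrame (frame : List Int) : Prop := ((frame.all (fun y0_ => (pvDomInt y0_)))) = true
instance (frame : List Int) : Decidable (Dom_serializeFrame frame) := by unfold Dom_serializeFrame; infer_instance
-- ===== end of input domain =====

-- B replaces A's single left-to-right scan (lookahead boundary test + trailing left pointer)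
-- by a divide-and-conquer: encode each half recursively and merge, fusing equal boundary runs.

-- ===== PORT A =====
-- literal port of A's index loop; pyGetD's default is never used: frame[right+1] is only
-- compared when right < length-1 (the ∨'s first disjunct short-circuits Python's access).
def serializeFrame (frame : List Int) : List (List Int) :=
  let length : Int := frame.length
  let st := (PySem.List.pyRange 0 length 1).foldl
    (fun (st : List (List Int) × Int) right =>
      if right = length - 1 ∨ PySem.List.pyGetD frame right 0 ≠ PySem.List.pyGetD frame (right + 1) 0
      then (st.1 ++ [[PySem.List.pyGetD frame right 0, right - st.2]], right)
      else st)
    ([], -1)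
  st.1

-- ===== PORT B =====
-- merge step of Source B's `encode`: left[-1] / right[0] are always 2-lists [value, count] on
-- reachable inputs, so headD/getD defaults are never used; the `_, _` catch-all (both lists
-- nonempty in Python) only makes the match total.
def pvMerge (L R : List (List Int)) : List (List Int) :=
  match L.getLast?, R with
  | some r, q :: rest =>
    if r.headD 0 = q.headD 0 then
      L.dropLast ++ [[r.headD 0, r.getD 1 0 + q.getD 1 0]] ++ rest
    else L ++ R
  | _, _ => L ++ R

-- Source B's recursive `encode`; the `hi ≤ lo + 1` branch is unreachable (encode is only called
-- with lo < hi) and only makes the recursion total.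
def pvEncode (frame : List Int) (lo hi : Nat) : List (List Int) :=
  if hi - lo = 1 then [[PySem.List.pyGetD frame (lo : Int) 0, 1]]
  else if hi ≤ lo + 1 then []
  else pvMerge (pvEncode frame lo ((lo + hi) / 2)) (pvEncode frame ((lo + hi) / 2) hi)
termination_by hi - lo
decreasing_by all_goals omega

def serializeFrame_alt (frame : List Int) : List (List Int) :=
  if frame = [] then [] else pvEncode frame 0 frame.length

-- ===== PRECONDITION & SPEC =====
def Spec_serializeFrame (frame : List Int) (out : List (List Int)) : Prop := out = serializeFrame_alt frame
instance (frame : List Int) (out : List (List Int)) : Decidable (Spec_serializeFrame frame out) := by unfold Spec_serializeFrame; infer_instance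

-- ===== CLAIM (what is proved, stated in full; the proofs are below) =====
def Claim_equal_serializeFrame : Prop := ∀ (frame : List Int), Dom_serializeFrame frame → Spec_serializeFrame frame (serializeFrame frame)

-- ===== LEMMAS AND PROOFS =====

-- common spec: run-length encoding of (k pending copies of c, already counted) followed by l
def grp (c : Int) (k : Int) : List Int → List (List Int)
  | [] => [[c, k]]
  | v :: l => if v = c then grp c (k + 1) l else [c, k] :: grp v 1 l

lemma grp_nil (c k : Int) : grp c k [] = [[c, k]] := rfl

lemma grp_cons (c k v : Int) (l : List Int) :
    grp c k (v :: l) = if v = c then grp c (k + 1) l else [c, k] :: grp v 1 l := rfl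

def rle : List Int → List (List Int)
  | [] => []
  | x :: l => grp x 1 l

lemma loopA (frame : List Int) : ∀ (l : List Int) (i : Nat) (x : Int)
    (h : frame.drop i = x :: l) (acc : List (List Int)) (left : Int),
    ((PySem.List.pyRange (i : Int) (frame.length : Int) 1).foldl
      (fun (st : List (List Int) × Int) right =>
        if right = (frame.length : Int) - 1 ∨
            PySem.List.pyGetD frame right 0 ≠ PySem.List.pyGetD frame (right + 1) 0
        then (st.1 ++ [[PySem.List.pyGetD frame right 0, right - st.2]], right)
        else st)
      (acc, left)).1 = acc ++ grp x ((i : Int) - left) l := by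
  intro l
  induction l with
  | nil =>
    intro i x h acc left
    have hi : i < frame.length := by
      by_contra hge
      simp [List.drop_eq_nil_of_le (Nat.le_of_not_lt hge)] at h
    have hlen : frame.length = i + 1 := by
      have := congrArg List.length h
      simp [List.length_drop] at this
      omega
    have hx : frame[i]? = some x := by
      have := congrArg (fun t => t[0]?) h
      simpa [List.getElem?_drop] using this
    have hgx : PySem.List.pyGetD frame (i : Int) 0 = x := by
      rw [PySem.List.pyGetD_natCast]
      simp [List.getD, hx]
    have hcond : (i : Int) = (frame.length : Int) - 1 := by omega
    have hrest : PySem.List.pyRange ((i : Int) + 1) (frame.length : Int) 1 = [] :=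
      PySem.List.pyRange_one_eq_nil (by omega)
    rw [PySem.List.pyRange_one_cons (by exact_mod_cast hi), hrest]
    simp only [List.foldl_cons, List.foldl_nil, if_pos (Or.inl hcond)]
    simp [hgx, grp]
  | cons y l' ih =>
    intro i x h acc left
    have hi : i < frame.length := by
      by_contra hge
      simp [List.drop_eq_nil_of_le (Nat.le_of_not_lt hge)] at h
    have hlen : frame.length = i + (l'.length + 2) := by
      have := congrArg List.length h
      simp [List.length_drop] at this
      omega
    have hx : frame[i]? = some x := by
      have := congrArg (fun t => t[0]?) h
      simpa [List.getElem?_drop] using this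
    have hy : frame[i + 1]? = some y := by
      have := congrArg (fun t => t[1]?) h
      simpa [List.getElem?_drop] using this
    have hdrop : frame.drop (i + 1) = y :: l' := by
      rw [← List.drop_drop, h]
      rfl
    have hne : ¬ ((i : Int) = (frame.length : Int) - 1) := by omega
    have hgx : PySem.List.pyGetD frame (i : Int) 0 = x := by
      rw [PySem.List.pyGetD_natCast]
      simp [List.getD, hx]
    have hcast : ((i : Int) + 1) = ((i + 1 : Nat) : Int) := by push_cast; ring
    have hgy : PySem.List.pyGetD frame ((i : Int) + 1) 0 = y := by
      rw [hcast, PySem.List.pyGetD_natCast]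
      simp [List.getD, hy]
    rw [PySem.List.pyRange_one_cons (by exact_mod_cast hi)]
    by_cases hxy : x = y
    · subst hxy
      have hstep : ¬ ((i : Int) = (frame.length : Int) - 1 ∨
          PySem.List.pyGetD frame (i : Int) 0 ≠ PySem.List.pyGetD frame ((i : Int) + 1) 0) := by
        rintro (hc | hc)
        · exact hne hc
        · exact hc (by rw [hgx, hgy])
      simp only [List.foldl_cons, if_neg hstep]
      rw [hcast, ih (i + 1) x hdrop acc left]
      have hg : grp x ((i : Int) - left) (x :: l') = grp x ((i : Int) - left + 1) l' := by
        simp [grp]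
      rw [hg]
      congr 2
      push_cast
      ring
    · have hstep : ((i : Int) = (frame.length : Int) - 1 ∨
          PySem.List.pyGetD frame (i : Int) 0 ≠ PySem.List.pyGetD frame ((i : Int) + 1) 0) :=
        Or.inr (by rw [hgx, hgy]; exact hxy)
      simp only [List.foldl_cons, if_pos hstep]
      rw [hcast, ih (i + 1) y hdrop _ (i : Int)]
      have h1 : ((i + 1 : Nat) : Int) - (i : Int) = 1 := by push_cast; ring
      rw [h1, hgx]
      have hg : grp x ((i : Int) - left) (y :: l') = [x, (i : Int) - left] :: grp y 1 l' := by
        rw [grp, if_neg (fun hh => hxy hh.symm)]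
      rw [hg]
      simp

lemma A_eq (x : Int) (rest : List Int) : serializeFrame (x :: rest) = grp x 1 rest := by
  have hA := loopA (x :: rest) rest 0 x rfl [] (-1)
  simp only [Nat.cast_zero] at hA
  have h01 : (0 : Int) - (-1) = 1 := by norm_num
  rw [h01] at hA
  simp only [serializeFrame]
  rw [hA]
  simp

-- the head of grp c k l is [c, k + m] for an m independent of k
lemma grp_shape (l : List Int) (c : Int) : ∃ m t, ∀ k, grp c k l = [c, k + m] :: t := by
  induction l generalizing c with
  | nil => exact ⟨0, [], fun k => by simp [grp]⟩
  | cons v l' ih =>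
    by_cases hv : v = c
    · subst hv
      obtain ⟨m, t, hmt⟩ := ih v
      exact ⟨m + 1, t, fun k => by rw [grp, if_pos rfl, hmt (k + 1)]; ring_nf⟩
    · exact ⟨0, grp v 1 l', fun k => by rw [grp, if_neg hv]; simp⟩

lemma pvMerge_cons (x : List Int) (L R : List (List Int)) (hL : L ≠ []) :
    pvMerge (x :: L) R = x :: pvMerge L R := by
  obtain ⟨h, t, rfl⟩ := List.exists_cons_of_ne_nil hL
  cases R with
  | nil => simp [pvMerge]
  | cons q rest =>
    cases hr : (h :: t).getLast? with
    | none => simp at hr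
    | some r =>
      have hlast : (x :: h :: t).getLast? = some r := by
        rw [List.getLast?_cons_cons]; exact hr
      simp only [pvMerge, hlast, hr]
      split_ifs <;> simp

lemma grp_append (l : List Int) : ∀ (c k y : Int) (b' : List Int),
    grp c k (l ++ y :: b') = pvMerge (grp c k l) (grp y 1 b') := by
  induction l with
  | nil =>
    intro c k y b'
    obtain ⟨m, t, hmt⟩ := grp_shape b' y
    simp only [List.nil_append]
    rw [grp_cons, grp_nil, hmt 1]
    by_cases hyc : y = c
    · subst hyc
      rw [if_pos rfl, hmt (k + 1)]
      simp [pvMerge]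
      ring_nf
    · rw [if_neg hyc]
      have hcy : ¬ (c = y) := fun h => hyc h.symm
      simp [pvMerge, hcy]
  | cons v l' ih =>
    intro c k y b'
    have hne : grp v 1 l' ≠ [] := by
      obtain ⟨m, t, hmt⟩ := grp_shape l' v
      rw [hmt 1]; simp
    by_cases hv : v = c
    · subst hv
      show grp v k (v :: (l' ++ y :: b')) = pvMerge (grp v k (v :: l')) (grp y 1 b')
      rw [grp, if_pos rfl, ih v (k + 1) y b']
      rw [show grp v k (v :: l') = grp v (k + 1) l' by rw [grp, if_pos rfl]]
    · show grp c k (v :: (l' ++ y :: b')) = pvMerge (grp c k (v :: l')) (grp y 1 b')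
      rw [grp, if_neg hv, ih v 1 y b']
      rw [show grp c k (v :: l') = [c, k] :: grp v 1 l' by rw [grp, if_neg hv]]
      rw [pvMerge_cons _ _ _ hne]

lemma rle_append (a b : List Int) (ha : a ≠ []) (hb : b ≠ []) :
    rle (a ++ b) = pvMerge (rle a) (rle b) := by
  obtain ⟨x, a', rfl⟩ := List.exists_cons_of_ne_nil ha
  obtain ⟨y, b', rfl⟩ := List.exists_cons_of_ne_nil hb
  show rle (x :: (a' ++ y :: b')) = _
  simp only [rle]
  exact grp_append a' x 1 y b'

lemma encode_eq (frame : List Int) : ∀ (n lo hi : Nat), hi - lo = n → lo < hi →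
    hi ≤ frame.length → pvEncode frame lo hi = rle ((frame.drop lo).take (hi - lo)) := by
  intro n
  induction n using Nat.strong_induction_on with
  | _ n ih =>
    intro lo hi hn hlt hle
    rw [pvEncode]
    by_cases h1 : hi - lo = 1
    · have hil : lo < frame.length := by omega
      obtain ⟨z, zs, hz⟩ : ∃ z zs, frame.drop lo = z :: zs := by
        cases hzz : frame.drop lo with
        | nil => exfalso; have := congrArg List.length hzz; simp [List.length_drop] at this; omega
        | cons z zs => exact ⟨z, zs, rfl⟩
      have hx : frame[lo]? = some z := by
        have := congrArg (fun t => t[0]?) hz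
        simpa [List.getElem?_drop] using this
      rw [if_pos h1, h1, hz]
      have : PySem.List.pyGetD frame (lo : Int) 0 = z := by
        rw [PySem.List.pyGetD_natCast]; simp [List.getD, hx]
      simp [this, rle, grp]
    · have h2 : ¬ hi ≤ lo + 1 := by omega
      rw [if_neg h1, if_neg h2]
      have hmid : lo < (lo + hi) / 2 ∧ (lo + hi) / 2 < hi := by omega
      set mid := (lo + hi) / 2 with hm
      rw [ih (mid - lo) (by omega) lo mid rfl hmid.1 (by omega),
          ih (hi - mid) (by omega) mid hi rfl hmid.2 hle]
      have hsplit : (frame.drop lo).take (hi - lo) =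
          (frame.drop lo).take (mid - lo) ++ (frame.drop mid).take (hi - mid) := by
        have hdd : (frame.drop lo).drop (mid - lo) = frame.drop mid := by
          rw [List.drop_drop]; congr 1; omega
        rw [show hi - lo = (mid - lo) + (hi - mid) by omega, List.take_add, hdd]
      rw [hsplit, rle_append]
      · have : ((frame.drop lo).take (mid - lo)).length = mid - lo := by
          simp [List.length_take, List.length_drop]; omega
        intro hnil; rw [hnil] at this; simp at this; omega
      · have : ((frame.drop mid).take (hi - mid)).length = hi - mid := by
          simp [List.length_take, List.length_drop]; omega
        intro hnil; rw [hnil] at this; simp at this; omega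

lemma B_eq (x : Int) (rest : List Int) : serializeFrame_alt (x :: rest) = grp x 1 rest := by
  have h := encode_eq (x :: rest) ((x :: rest).length) 0 (x :: rest).length rfl (by simp) le_rfl
  simp only [Nat.sub_zero, List.drop_zero, List.take_length] at h
  simp only [serializeFrame_alt, if_neg (List.cons_ne_nil x rest)]
  rw [h]
  rfl

-- ===== VERDICT (by name: the statement is the Claim_ definition above) =====
theorem serializeFrame_spec : Claim_equal_serializeFrame := by
  intro frame _
  unfold Spec_serializeFrame
  cases frame with
  | nil => decide
  | cons x rest => rw [A_eq, B_eq]
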